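-- pv_equiv track=rewrite | github.com/kollosp/niduc | algorythms.py | parityCode
-- ===== SOURCE A (Python) =====
-- def parityCode(array):
-- 	paritySum = 0
--
-- 	#for all bytes
-- 	for i in range(len(array)):
-- 		#for all bits
-- 		mask = 1
-- 		for j in range(8):
-- 			if (array[i] & mask) > 0:
-- 				paritySum+=1
--
-- 			mask *= 2
--
-- 	return paritySum % 2 # 1 if odd
-- ===== SOURCE B (Python) =====
-- def parityCode(array):
-- 	# XOR-fold the low bytes into one accumulator, then one popcount at the end
-- 	acc = 0
-- 	for b in array:
-- 		acc ^= b & 0xFF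
-- 	return acc.bit_count() % 2
-- ===== Notes on version B (the rewrite author's own statement) =====
-- stated objective: faster
-- what changed: Instead of a nested 8-iteration bit loop counting set bits per element, B XOR-folds the low byte of every element into a single accumulator and takes one popcount at the end.
import Mathlib
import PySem

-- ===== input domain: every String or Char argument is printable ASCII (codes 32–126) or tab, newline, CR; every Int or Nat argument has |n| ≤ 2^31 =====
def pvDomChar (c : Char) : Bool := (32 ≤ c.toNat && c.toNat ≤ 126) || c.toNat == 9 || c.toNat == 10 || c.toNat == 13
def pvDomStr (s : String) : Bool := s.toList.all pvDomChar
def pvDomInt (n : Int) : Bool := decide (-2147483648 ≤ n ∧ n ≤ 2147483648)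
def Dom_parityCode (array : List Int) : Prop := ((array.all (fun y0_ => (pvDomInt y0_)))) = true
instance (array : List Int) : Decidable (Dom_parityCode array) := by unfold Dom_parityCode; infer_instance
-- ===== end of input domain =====

-- B replaces A's per-element 8-bit counting loop by an XOR fold of the low bytes with a single
-- final popcount (objective: faster, constant-factor).

-- ===== PORT A =====
def parityCode (array : List Int) : Int :=
  let paritySum : Int :=
    (PySem.List.pyRange 0 (PySem.List.len array)).foldl
      (fun paritySum i =>
        ((PySem.List.pyRange 0 8).foldl
          (fun (st : Int × Int) _j =>
            (if PySem.Int.band (PySem.List.pyGetD array i 0) st.2 > 0 then st.1 + 1 else st.1,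
             st.2 * 2))
          (paritySum, 1)).1)
      0
  PySem.Int.mod paritySum 2

-- ===== PORT B =====
def parityCode_alt (array : List Int) : Int :=
  let acc : Int := array.foldl (fun acc b => PySem.Int.bxor acc (PySem.Int.band b 255)) 0
  PySem.Int.mod ((PySem.Int.bitCount acc : Nat) : Int) 2

-- ===== PRECONDITION & SPEC =====
def Spec_parityCode (array : List Int) (out : Int) : Prop := out = parityCode_alt array
instance (array : List Int) (out : Int) : Decidable (Spec_parityCode array out) := by unfold Spec_parityCode; infer_instance

-- ===== CLAIM (what is proved, stated in full; the proofs are below) =====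
def Claim_equal_parityCode : Prop := ∀ (array : List Int), Dom_parityCode array → Spec_parityCode array (parityCode array)

-- ===== LEMMAS AND PROOFS =====

-- the per-element count A adds: set bits of b at positions 0..7, as the eight ite terms
def cntSum (b : Int) : Int :=
  (if PySem.Int.band b 1 > 0 then (1:Int) else 0) + (if PySem.Int.band b 2 > 0 then 1 else 0)
  + (if PySem.Int.band b 4 > 0 then 1 else 0) + (if PySem.Int.band b 8 > 0 then 1 else 0)
  + (if PySem.Int.band b 16 > 0 then 1 else 0) + (if PySem.Int.band b 32 > 0 then 1 else 0)
  + (if PySem.Int.band b 64 > 0 then 1 else 0) + (if PySem.Int.band b 128 > 0 then 1 else 0)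

lemma ite_succ_int (c : Prop) [Decidable c] (x : Int) :
    (if c then x + 1 else x) = x + (if c then 1 else 0) := by
  split_ifs <;> ring

lemma fold8 (b p : Int) :
    ((PySem.List.pyRange 0 8).foldl
      (fun (st : Int × Int) _j =>
        (if PySem.Int.band b st.2 > 0 then st.1 + 1 else st.1, st.2 * 2)) (p, 1)).1
    = p + cntSum b := by
  have hr : PySem.List.pyRange 0 8 = [0,1,2,3,4,5,6,7] := by decide
  rw [hr]
  dsimp only [List.foldl]
  norm_num only
  simp only [ite_succ_int]
  unfold cntSum
  ring

lemma band_neg_nonneg (a b : Int) (ha : a < 0) (hb : 0 ≤ b) :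
    PySem.Int.band a b = ((b.toNat - (b.toNat &&& (-a - 1).toNat) : Nat) : Int) := by
  rw [PySem.Int.band, if_neg (by omega), if_pos hb]

lemma land255 (m : Nat) : m &&& 255 = m % 256 := by
  refine Nat.eq_of_testBit_eq fun i => ?_
  have h1 : (255:Nat) = 2 ^ 8 - 1 := by norm_num
  have h2 : (256:Nat) = 2 ^ 8 := by norm_num
  rw [h1, h2, Nat.testBit_land, Nat.testBit_two_pow_sub_one, Nat.testBit_mod_two_pow,
    Bool.and_comm]

lemma land_mod (m k : Nat) (hk : 255 &&& k = k) : m &&& k = (m % 256) &&& k := by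
  conv_lhs => rw [← hk, ← Nat.land_assoc, land255]

lemma land_mod' (k m : Nat) (hk : 255 &&& k = k) : k &&& m = k &&& (m % 256) := by
  rw [Nat.land_comm, land_mod m k hk, Nat.land_comm]

set_option maxRecDepth 10000 in
lemma cnt_pos : ∀ r : Nat, r < 256 →
    ((if ((r &&& 1 : Nat) : Int) > 0 then (1:Int) else 0) + (if ((r &&& 2 : Nat) : Int) > 0 then 1 else 0)
     + (if ((r &&& 4 : Nat) : Int) > 0 then 1 else 0) + (if ((r &&& 8 : Nat) : Int) > 0 then 1 else 0)
     + (if ((r &&& 16 : Nat) : Int) > 0 then 1 else 0) + (if ((r &&& 32 : Nat) : Int) > 0 then 1 else 0)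
     + (if ((r &&& 64 : Nat) : Int) > 0 then 1 else 0) + (if ((r &&& 128 : Nat) : Int) > 0 then 1 else 0))
    = ((PySem.Int.bitCount ((r &&& 255 : Nat) : Int) : Nat) : Int) := by decide

set_option maxRecDepth 10000 in
lemma cnt_neg : ∀ s : Nat, s < 256 →
    ((if ((1 - (1 &&& s) : Nat) : Int) > 0 then (1:Int) else 0) + (if ((2 - (2 &&& s) : Nat) : Int) > 0 then 1 else 0)
     + (if ((4 - (4 &&& s) : Nat) : Int) > 0 then 1 else 0) + (if ((8 - (8 &&& s) : Nat) : Int) > 0 then 1 else 0)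
     + (if ((16 - (16 &&& s) : Nat) : Int) > 0 then 1 else 0) + (if ((32 - (32 &&& s) : Nat) : Int) > 0 then 1 else 0)
     + (if ((64 - (64 &&& s) : Nat) : Int) > 0 then 1 else 0) + (if ((128 - (128 &&& s) : Nat) : Int) > 0 then 1 else 0))
    = ((PySem.Int.bitCount ((255 - (255 &&& s) : Nat) : Int) : Nat) : Int) := by decide

lemma cnt_eq (b : Int) :
    cntSum b = ((PySem.Int.bitCount (PySem.Int.band b 255) : Nat) : Int) := by
  rcases (by omega : 0 ≤ b ∨ b < 0) with hb | hb
  · unfold cntSum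
    simp only [PySem.Int.band_of_nonneg hb (by norm_num : (0:Int) ≤ 1),
      PySem.Int.band_of_nonneg hb (by norm_num : (0:Int) ≤ 2),
      PySem.Int.band_of_nonneg hb (by norm_num : (0:Int) ≤ 4),
      PySem.Int.band_of_nonneg hb (by norm_num : (0:Int) ≤ 8),
      PySem.Int.band_of_nonneg hb (by norm_num : (0:Int) ≤ 16),
      PySem.Int.band_of_nonneg hb (by norm_num : (0:Int) ≤ 32),
      PySem.Int.band_of_nonneg hb (by norm_num : (0:Int) ≤ 64),
      PySem.Int.band_of_nonneg hb (by norm_num : (0:Int) ≤ 128),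
      PySem.Int.band_of_nonneg hb (by norm_num : (0:Int) ≤ 255)]
    simp only [show (1:Int).toNat = 1 from rfl, show (2:Int).toNat = 2 from rfl,
      show (4:Int).toNat = 4 from rfl, show (8:Int).toNat = 8 from rfl,
      show (16:Int).toNat = 16 from rfl, show (32:Int).toNat = 32 from rfl,
      show (64:Int).toNat = 64 from rfl, show (128:Int).toNat = 128 from rfl,
      show (255:Int).toNat = 255 from rfl]
    simp only [land_mod b.toNat 1 (by decide), land_mod b.toNat 2 (by decide),
      land_mod b.toNat 4 (by decide), land_mod b.toNat 8 (by decide),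
      land_mod b.toNat 16 (by decide), land_mod b.toNat 32 (by decide),
      land_mod b.toNat 64 (by decide), land_mod b.toNat 128 (by decide),
      land_mod b.toNat 255 (by decide)]
    exact cnt_pos (b.toNat % 256) (Nat.mod_lt _ (by norm_num))
  · unfold cntSum
    rw [band_neg_nonneg b 1 hb (by norm_num), band_neg_nonneg b 2 hb (by norm_num),
      band_neg_nonneg b 4 hb (by norm_num), band_neg_nonneg b 8 hb (by norm_num),
      band_neg_nonneg b 16 hb (by norm_num), band_neg_nonneg b 32 hb (by norm_num),
      band_neg_nonneg b 64 hb (by norm_num), band_neg_nonneg b 128 hb (by norm_num),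
      band_neg_nonneg b 255 hb (by norm_num)]
    simp only [show (1:Int).toNat = 1 from rfl, show (2:Int).toNat = 2 from rfl,
      show (4:Int).toNat = 4 from rfl, show (8:Int).toNat = 8 from rfl,
      show (16:Int).toNat = 16 from rfl, show (32:Int).toNat = 32 from rfl,
      show (64:Int).toNat = 64 from rfl, show (128:Int).toNat = 128 from rfl,
      show (255:Int).toNat = 255 from rfl]
    simp only [land_mod' 1 (-b-1).toNat (by decide), land_mod' 2 (-b-1).toNat (by decide),
      land_mod' 4 (-b-1).toNat (by decide), land_mod' 8 (-b-1).toNat (by decide),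
      land_mod' 16 (-b-1).toNat (by decide), land_mod' 32 (-b-1).toNat (by decide),
      land_mod' 64 (-b-1).toNat (by decide), land_mod' 128 (-b-1).toNat (by decide),
      land_mod' 255 (-b-1).toNat (by decide)]
    exact cnt_neg ((-b-1).toNat % 256) (Nat.mod_lt _ (by norm_num))

-- band with 255 always lands in a byte
lemma band255_byte (b : Int) : ∃ r : Nat, r < 256 ∧ PySem.Int.band b 255 = (r : Int) := by
  rcases (by omega : 0 ≤ b ∨ b < 0) with hb | hb
  · refine ⟨b.toNat &&& (255:Int).toNat, ?_, PySem.Int.band_of_nonneg hb (by norm_num)⟩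
    have : (255:Int).toNat = 255 := by decide
    rw [this, land255]
    exact Nat.mod_lt _ (by norm_num)
  · refine ⟨(255:Int).toNat - ((255:Int).toNat &&& (-b-1).toNat), ?_, band_neg_nonneg b 255 hb (by norm_num)⟩
    have : (255:Int).toNat = 255 := by decide
    omega

-- parity of popcount is additive under xor
lemma xorpar : ∀ a b : Nat,
    PySem.Int.bitCount ((a ^^^ b : Nat) : Int) % 2
      = (PySem.Int.bitCount (a : Int) + PySem.Int.bitCount (b : Int)) % 2 := by
  intro a
  induction a using Nat.strong_induction_on with
  | _ a ih =>
    intro b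
    rcases Nat.eq_zero_or_pos a with ha | ha
    · subst ha; simp [Nat.zero_xor]
    rcases Nat.eq_zero_or_pos b with hb0 | hb0
    · subst hb0; simp [Nat.xor_zero]
    rcases Nat.eq_zero_or_pos (a ^^^ b) with hx | hx
    · have hab : a = b := by
        have := Nat.xor_eq_zero_iff.mp hx
        exact this
      rw [hx, hab]
      simp
      omega
    have h1 := PySem.Int.bitCount_natCast hx
    have h2 := PySem.Int.bitCount_natCast ha
    have h3 := PySem.Int.bitCount_natCast hb0
    have hdiv : (a ^^^ b) / 2 = (a / 2) ^^^ (b / 2) := by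
      refine Nat.eq_of_testBit_eq fun i => ?_
      simp [Nat.testBit_div_two, Nat.testBit_xor]
    have hmod : (a ^^^ b) % 2 = (a % 2 + b % 2) % 2 := by
      have : (a ^^^ b) &&& 1 = (a &&& 1) ^^^ (b &&& 1) := Nat.and_xor_distrib_right
      rw [Nat.and_one_is_mod, Nat.and_one_is_mod, Nat.and_one_is_mod] at this
      have ha2 := Nat.mod_lt a (show 0 < 2 by norm_num)
      have hb2 := Nat.mod_lt b (show 0 < 2 by norm_num)
      interval_cases h : a % 2 <;> interval_cases h2 : b % 2 <;> omega
    have ihh := ih (a / 2) (Nat.div_lt_self ha (by norm_num)) (b / 2)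
    rw [hdiv] at h1
    omega

-- parity invariant of B's xor fold
lemma accB (l : List Int) : ∀ c : Nat,
    PySem.Int.bitCount (l.foldl (fun a b => PySem.Int.bxor a (PySem.Int.band b 255)) (c : Int)) % 2
      = (PySem.Int.bitCount (c : Int)
          + (l.map (fun b => PySem.Int.bitCount (PySem.Int.band b 255))).sum) % 2 := by
  induction l with
  | nil => intro c; simp
  | cons b l ih =>
    intro c
    obtain ⟨r, _, hr⟩ := band255_byte b
    simp only [List.foldl_cons, List.map_cons, List.sum_cons, hr, PySem.Int.bxor_natCast]
    rw [ih (c ^^^ r)]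
    have := xorpar c r
    omega

lemma castsum (l : List Int) :
    (l.map (fun b => ((PySem.Int.bitCount (PySem.Int.band b 255) : Nat) : Int))).sum
      = (((l.map (fun b => PySem.Int.bitCount (PySem.Int.band b 255))).sum : Nat) : Int) := by
  induction l with
  | nil => simp
  | cons b l ih => simp [ih]

lemma fmod_cast_two (a : Nat) : PySem.Int.mod ((a : Nat) : Int) 2 = ((a % 2 : Nat) : Int) := by
  rw [PySem.Int.mod, Int.fmod_eq_emod, if_pos (Or.inl (by norm_num))]
  push_cast
  simp

-- ===== VERDICT (by name: the statement is the Claim_ definition above) =====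
theorem parityCode_spec : Claim_equal_parityCode := by
  intro array _
  show parityCode array = parityCode_alt array
  unfold parityCode parityCode_alt
  rw [PySem.List.foldl_pyRange_pyGetD array 0
    (fun paritySum b =>
      ((PySem.List.pyRange 0 8).foldl
        (fun (st : Int × Int) _j =>
          (if PySem.Int.band b st.2 > 0 then st.1 + 1 else st.1, st.2 * 2))
        (paritySum, 1)).1) 0 (le_refl 0)]
  simp only [Int.toNat_zero, List.drop_zero, fold8, cnt_eq, PySem.List.foldl_add, castsum]
  rw [zero_add, fmod_cast_two]
  have h0 : (0 : Int) = ((0 : Nat) : Int) := rfl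
  rw [h0, fmod_cast_two, accB array 0]
  simp
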